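-- pv_equiv track=rewrite | github.com/Pauljls/Horario | genetic.py | contar_fragmentaciones
-- ===== SOURCE A (Python) =====
-- def contar_fragmentaciones(materias: list) -> int:
--     """
--     Cuenta cuántas veces una materia aparece intercalada con otra distinta.
--     Ej: [Mat, Com, Mat] → Mat está fragmentada → penalización 1.
--     """
--     penalizacion = 0
--     vistas: dict[str, int] = {}
--     ultima = None
--     for m in materias:
--         if m is None:
--             ultima = None
--             continue
--         if m != ultima:
--             if m in vistas:
--                 # Esta materia ya apareció antes y fue interrumpida
--                 penalizacion += 1
--             vistas[m] = vistas.get(m, 0) + 1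
--             ultima = m
--         else:
--             ultima = m
--     return penalizacion
-- ===== SOURCE B (Python) =====
-- def contar_fragmentaciones(materias: list) -> int:
--     # Per-subject block counting: for each distinct subject, scan the sequence
--     # counting its maximal consecutive blocks; each block after the first is one
--     # penalty (sum order over the set is irrelevant: addition commutes).
--     total = 0
--     for s in set(m for m in materias if m is not None):
--         bloques = 0
--         prev = None
--         for m in materias:
--             if m == s and prev != s:
--                 bloques += 1
--             prev = m
--         total += bloques - 1
--     return total
-- ===== Notes on version B (the rewrite author's own statement) =====
-- stated objective: alternative
-- what changed: Replaces A's single-pass ultima/vistas dict state machine with a per-subject decomposition: for each distinct subject an independent scan counts its maximal consecutive blocks, and the answer is the sum of (blocks - 1) over subjects.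
import Mathlib
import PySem

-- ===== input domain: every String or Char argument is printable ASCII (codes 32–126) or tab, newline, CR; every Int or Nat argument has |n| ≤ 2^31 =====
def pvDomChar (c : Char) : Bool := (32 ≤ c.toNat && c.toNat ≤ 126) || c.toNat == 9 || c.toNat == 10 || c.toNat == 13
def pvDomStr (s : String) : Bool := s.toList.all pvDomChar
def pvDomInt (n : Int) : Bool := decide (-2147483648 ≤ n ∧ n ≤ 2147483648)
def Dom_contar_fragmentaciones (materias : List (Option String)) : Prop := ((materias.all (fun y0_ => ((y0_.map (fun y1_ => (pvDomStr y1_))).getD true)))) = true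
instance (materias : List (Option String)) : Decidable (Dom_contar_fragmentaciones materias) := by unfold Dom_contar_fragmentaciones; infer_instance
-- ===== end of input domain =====

-- B replaces A's single-pass ultima/vistas state machine by a per-subject decomposition:
-- for each distinct subject an independent scan counts its maximal consecutive blocks,
-- and the answer is the sum of (blocks - 1) over subjects (objective: alternative).

-- ===== PORT A =====
-- loop state = (penalizacion, vistas, ultima), exactly the three variables of A's loop
def stepA (st : Int × PySem.Dict String Int × Option String) (m : Option String) :
    Int × PySem.Dict String Int × Option String :=
  match m with
  | none => (st.1, st.2.1, none)
  | some s =>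
    if (some s : Option String) ≠ st.2.2 then
      ((if st.2.1.contains s then st.1 + 1 else st.1),
       st.2.1.insert s (st.2.1.getD s 0 + 1), some s)
    else (st.1, st.2.1, some s)

def contar_fragmentaciones (materias : List (Option String)) : Int :=
  (materias.foldl stepA (0, PySem.Dict.empty, none)).1

-- ===== PORT B =====
-- inner loop of B: count the maximal consecutive blocks of subject s; state = (bloques, prev)
def blocksB (s : String) (materias : List (Option String)) : Int :=
  (materias.foldl
    (fun st m => ((if m == some s && st.2 != some s then st.1 + 1 else st.1), m))
    ((0 : Int), (none : Option String))).1

def contar_fragmentaciones_alt (materias : List (Option String)) : Int :=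
  (PySem.Set.ofList (materias.filterMap id)).foldl
    (fun total s => total + (blocksB s materias - 1)) 0

-- ===== PRECONDITION & SPEC =====
def Spec_contar_fragmentaciones (materias : List (Option String)) (out : Int) : Prop := out = contar_fragmentaciones_alt materias
instance (materias : List (Option String)) (out : Int) : Decidable (Spec_contar_fragmentaciones materias out) := by unfold Spec_contar_fragmentaciones; infer_instance

-- ===== CLAIM (what is proved, stated in full; the proofs are below) =====
def Claim_equal_contar_fragmentaciones : Prop := ∀ (materias : List (Option String)), Dom_contar_fragmentaciones materias → Spec_contar_fragmentaciones materias (contar_fragmentaciones materias)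

-- ===== LEMMAS AND PROOFS =====

-- the run representatives of l when the previous non-broken element was u
def runsFrom : Option String → List (Option String) → List String
  | _, [] => []
  | _, none :: rest => runsFrom none rest
  | u, some s :: rest =>
    if (some s : Option String) = u then runsFrom (some s) rest
    else s :: runsFrom (some s) rest

-- penalty of a run list given the set of subjects already seen (A's invariant)
def penOf : List String → PySem.Set String → Int
  | [], _ => 0
  | r :: rs, seen => (if r ∈ seen then 1 else 0) + penOf rs (PySem.Set.add seen r)

theorem foldl_eq_penOf (l : List (Option String)) :
    ∀ (pen : Int) (d : PySem.Dict String Int) (u : Option String) (seen : PySem.Set String),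
    (∀ s : String, d.contains s = true ↔ s ∈ seen) →
    (l.foldl stepA (pen, d, u)).1 = pen + penOf (runsFrom u l) seen := by
  induction l with
  | nil => intro pen d u seen _; simp [runsFrom, penOf]
  | cons m rest ih =>
    intro pen d u seen hinv
    cases m with
    | none =>
      rw [List.foldl_cons]
      have hstep : stepA (pen, d, u) none = (pen, d, none) := rfl
      rw [hstep]
      simpa [runsFrom] using ih pen d none seen hinv
    | some s =>
      rw [List.foldl_cons]
      by_cases h : (some s : Option String) = u
      · have hstep : stepA (pen, d, u) (some s) = (pen, d, some s) := by
          simp [stepA, h]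
        rw [hstep]
        have hr : runsFrom u (some s :: rest) = runsFrom (some s) rest := by
          simp [runsFrom, h]
        rw [hr]
        exact ih pen d (some s) seen hinv
      · have hstep : stepA (pen, d, u) (some s)
            = ((if d.contains s then pen + 1 else pen),
               d.insert s (d.getD s 0 + 1), some s) := by
          simp [stepA, h]
        rw [hstep]
        have hinv' : ∀ t : String,
            (d.insert s (d.getD s 0 + 1)).contains t = true ↔ t ∈ PySem.Set.add seen s := by
          intro t
          rw [PySem.Dict.contains_insert, PySem.Set.mem_add]
          constructor
          · intro ht
            rcases Bool.or_eq_true_iff.mp ht with ht | ht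
            · exact Or.inr (eq_of_beq ht)
            · exact Or.inl ((hinv t).mp ht)
          · intro ht
            rcases ht with ht | ht
            · exact Bool.or_eq_true_iff.mpr (Or.inr ((hinv t).mpr ht))
            · exact Bool.or_eq_true_iff.mpr (Or.inl (by simp [ht]))
        rw [ih (if d.contains s then pen + 1 else pen)
            (d.insert s (d.getD s 0 + 1)) (some s) (PySem.Set.add seen s) hinv']
        have hr : runsFrom u (some s :: rest) = s :: runsFrom (some s) rest := by
          simp [runsFrom, h]
        rw [hr, penOf]
        by_cases hs : s ∈ seen
        · rw [if_pos ((hinv s).mpr hs), if_pos hs]; ring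
        · rw [if_neg (fun hc => hs ((hinv s).mp hc)), if_neg hs]; ring

theorem penOf_closed (r : List String) :
    ∀ (S : PySem.Set String), S.Nodup →
    penOf r S = (r.length : Int) + (S.length : Int) - ((r.foldl PySem.Set.add S).length : Int) := by
  induction r with
  | nil => intro S _; simp [penOf]
  | cons x xs ih =>
    intro S hS
    have ihx := ih (PySem.Set.add S x) (PySem.Set.nodup_add S x hS)
    by_cases hx : x ∈ S
    · rw [penOf, if_pos hx, ihx]
      simp only [List.foldl_cons, PySem.Set.add_of_mem hx, List.length_cons]
      push_cast; ring
    · rw [penOf, if_neg hx, ihx]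
      simp only [List.foldl_cons, PySem.Set.add_of_not_mem hx, List.length_cons,
        List.length_append, List.length_nil]
      push_cast; ring

-- B's inner scan counts exactly the occurrences of s among the run representatives
theorem blocksB_foldl_eq_count (s : String) (l : List (Option String)) :
    ∀ (c : Int) (u : Option String),
    (l.foldl (fun st m => ((if m == some s && st.2 != some s then st.1 + 1 else st.1), m))
        (c, u)).1 = c + ((runsFrom u l).count s : Int) := by
  induction l with
  | nil => intro c u; simp [runsFrom]
  | cons m rest ih =>
    intro c u
    cases m with
    | none => simpa [runsFrom] using ih c none
    | some t =>
      rw [List.foldl_cons]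
      by_cases ht : t = s
      · subst ht
        by_cases h : (some t : Option String) = u
        · have : (some t == some t && u != some t) = false := by
            simp [h.symm]
          rw [this]
          simpa [runsFrom, h] using ih c (some t)
        · have : (some t == some t && u != some t) = true := by
            simp [bne_iff_ne]; exact fun he => h he.symm
          rw [this, if_pos rfl]
          have hr : runsFrom u (some t :: rest) = t :: runsFrom (some t) rest := by
            simp [runsFrom, h]
          have : ((c, u).1 + 1, some t) = ((c + 1 : Int), (some t : Option String)) := rfl
          rw [this, ih (c + 1) (some t), hr, List.count_cons]
          simp; ring
      · have : (some t == some s && u != some s) = false := by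
          simp [ht]
        rw [this, if_neg (by simp)]
        have hpair : ((c, u).1, (some t : Option String)) = (c, some t) := rfl
        rw [hpair]
        by_cases h : (some t : Option String) = u
        · have hr : runsFrom u (some t :: rest) = runsFrom (some t) rest := by
            simp [runsFrom, h]
          rw [ih c (some t), hr]
        · have hr : runsFrom u (some t :: rest) = t :: runsFrom (some t) rest := by
            simp [runsFrom, h]
          rw [ih c (some t), hr, List.count_cons]
          simp [ht]

theorem mem_runsFrom_of_mem (s : String) (l : List (Option String)) :
    ∀ u, some s ∈ l → s ∈ runsFrom u l ∨ u = some s := by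
  induction l with
  | nil => intro u h; cases h
  | cons m rest ih =>
    intro u h
    cases m with
    | none =>
      have hrest : some s ∈ rest := by
        rcases List.mem_cons.mp h with h | h
        · cases h
        · exact h
      rcases ih none hrest with h' | h'
      · exact Or.inl (by simpa [runsFrom] using h')
      · cases h'
    | some t =>
      by_cases hu : (some t : Option String) = u
      · by_cases hts : t = s
        · exact Or.inr (by rw [← hu, hts])
        · have hrest : some s ∈ rest := by
            rcases List.mem_cons.mp h with h | h
            · exact absurd (Option.some.inj h).symm hts
            · exact h
          rcases ih (some t) hrest with h' | h'
          · exact Or.inl (by simpa [runsFrom, hu] using h')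
          · exact absurd (Option.some.inj h') hts
      · by_cases hts : t = s
        · subst hts; exact Or.inl (by simp [runsFrom, hu])
        · have hrest : some s ∈ rest := by
            rcases List.mem_cons.mp h with h | h
            · exact absurd (Option.some.inj h).symm hts
            · exact h
          rcases ih (some t) hrest with h' | h'
          · exact Or.inl (by simp [runsFrom, hu]; exact Or.inr h')
          · exact absurd (Option.some.inj h') hts

theorem mem_of_mem_runsFrom (s : String) (l : List (Option String)) :
    ∀ u, s ∈ runsFrom u l → some s ∈ l := by
  induction l with
  | nil => intro u h; cases h
  | cons m rest ih =>
    intro u h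
    cases m with
    | none =>
      exact List.mem_cons.mpr (Or.inr (ih none (by simpa [runsFrom] using h)))
    | some t =>
      by_cases hu : (some t : Option String) = u
      · exact List.mem_cons.mpr (Or.inr (ih (some t) (by simpa [runsFrom, hu] using h)))
      · rw [show runsFrom u (some t :: rest) = t :: runsFrom (some t) rest by
            simp [runsFrom, hu]] at h
        rcases List.mem_cons.mp h with h | h
        · exact List.mem_cons.mpr (Or.inl (by rw [h]))
        · exact List.mem_cons.mpr (Or.inr (ih (some t) h))

theorem sum_ite_eq_zero (x : String) (D : List String) (hx : x ∉ D) :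
    (D.map (fun s => if s = x then (1 : Int) else 0)).sum = 0 := by
  induction D with
  | nil => simp
  | cons d rest ih =>
    have hdx : d ≠ x := fun h => hx (h ▸ List.mem_cons_self)
    have : x ∉ rest := fun h => hx (List.mem_cons.mpr (Or.inr h))
    simp [hdx, ih this]

theorem sum_ite_eq_one (x : String) (D : List String) (hD : D.Nodup) (hx : x ∈ D) :
    (D.map (fun s => if s = x then (1 : Int) else 0)).sum = 1 := by
  induction D with
  | nil => cases hx
  | cons d rest ih =>
    rcases List.mem_cons.mp hx with h | h
    · have hnr : x ∉ rest := by rw [h]; exact (List.nodup_cons.mp hD).1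
      simp [h.symm, sum_ite_eq_zero x rest hnr]
    · have hdx : d ≠ x := fun he => (List.nodup_cons.mp hD).1 (he ▸ h)
      simp [hdx, ih (List.nodup_cons.mp hD).2 h]

theorem sum_counts (r : List String) :
    ∀ (D : List String), D.Nodup → (∀ y ∈ r, y ∈ D) →
    (D.map (fun s => ((r.count s : Nat) : Int))).sum = (r.length : Int) := by
  induction r with
  | nil => intro D _ _; simp
  | cons x xs ih =>
    intro D hD hsub
    have hx : x ∈ D := hsub x List.mem_cons_self
    have hsub' : ∀ y ∈ xs, y ∈ D := fun y hy => hsub y (List.mem_cons.mpr (Or.inr hy))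
    have hsplit : (D.map (fun s => (((x :: xs).count s : Nat) : Int))).sum
        = (D.map (fun s => ((xs.count s : Nat) : Int))).sum
          + (D.map (fun s => if s = x then (1 : Int) else 0)).sum := by
      rw [← PySem.List.sum_map_add_int]
      refine congrArg List.sum (List.map_congr_left ?_)
      intro s _
      rw [List.count_cons]
      by_cases hsx : s = x
      · simp [hsx]
      · simp [hsx, Ne.symm hsx]
    rw [hsplit, ih D hD hsub', sum_ite_eq_one x D hD hx, List.length_cons]
    push_cast
    ring

theorem foldl_sub_one (D : List String) (f : String → Int) :
    ∀ (init : Int),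
    D.foldl (fun total s => total + (f s - 1)) init
      = init + (D.map f).sum - (D.length : Int) := by
  induction D with
  | nil => intro init; simp
  | cons d rest ih =>
    intro init
    rw [List.foldl_cons, ih (init + (f d - 1))]
    simp [List.length_cons]; ring

theorem length_eq_of_nodup_of_mem_iff (l₁ l₂ : List String)
    (h₁ : l₁.Nodup) (h₂ : l₂.Nodup) (h : ∀ x, x ∈ l₁ ↔ x ∈ l₂) :
    l₁.length = l₂.length :=
  ((List.perm_ext_iff_of_nodup h₁ h₂).mpr h).length_eq

-- ===== VERDICT (by name: the statement is the Claim_ definition above) =====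
theorem contar_fragmentaciones_spec : Claim_equal_contar_fragmentaciones := by
  intro materias _
  show contar_fragmentaciones materias = contar_fragmentaciones_alt materias
  set runs := runsFrom none materias with hruns
  set D := PySem.Set.ofList (materias.filterMap id) with hD
  have hDnodup : D.Nodup := PySem.Set.nodup_ofList _
  have hmemD : ∀ y : String, y ∈ D ↔ some y ∈ materias := by
    intro y
    rw [hD, PySem.Set.mem_ofList, List.mem_filterMap]
    constructor
    · rintro ⟨o, ho, he⟩; cases o with
      | none => cases he
      | some z => cases he; exact ho
    · intro h; exact ⟨some y, h, rfl⟩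
  have hmemruns : ∀ y : String, y ∈ runs ↔ some y ∈ materias := by
    intro y
    constructor
    · exact mem_of_mem_runsFrom y materias none
    · intro h
      rcases mem_runsFrom_of_mem y materias none h with h' | h'
      · exact h'
      · cases h'
  -- A's side
  rw [contar_fragmentaciones,
      foldl_eq_penOf materias 0 PySem.Dict.empty none PySem.Set.empty
        (by intro s; simp [PySem.Set.empty]),
      penOf_closed runs PySem.Set.empty List.nodup_nil]
  -- B's side
  rw [contar_fragmentaciones_alt, ← hD]
  have hblocks : ∀ s ∈ D, blocksB s materias = ((runs.count s : Nat) : Int) := by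
    intro s _
    rw [blocksB, blocksB_foldl_eq_count s materias 0 none]; ring
  have hc : D.foldl (fun total s => total + (blocksB s materias - 1)) 0
      = D.foldl (fun total s => total + (((runs.count s : Nat) : Int) - 1)) 0 :=
    PySem.List.foldl_congr_mem D _ _ 0 (fun acc s hs => by rw [hblocks s hs])
  rw [hc]
  rw [foldl_sub_one D _ 0,
      sum_counts runs D hDnodup (fun y hy => (hmemD y).mpr ((hmemruns y).mp hy))]
  have hlen : D.length = (runs.foldl PySem.Set.add PySem.Set.empty).length := by
    refine length_eq_of_nodup_of_mem_iff _ _ hDnodup ?_ ?_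
    · rw [show runs.foldl PySem.Set.add PySem.Set.empty = PySem.Set.ofList runs from
          (PySem.Set.ofList_eq_foldl runs).symm]
      exact PySem.Set.nodup_ofList _
    · intro x
      rw [show runs.foldl PySem.Set.add PySem.Set.empty = PySem.Set.ofList runs from
          (PySem.Set.ofList_eq_foldl runs).symm, hmemD x, PySem.Set.mem_ofList,
        hmemruns x]
  rw [hlen]
  simp [PySem.Set.empty]
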